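-- pv_equiv track=rewrite | github.com/canvas-medical/fhirstarter | fhirstarter/search_parameters.py | _transform_description
-- ===== SOURCE A (Python) =====
-- def _transform_description(description: str, resource_type: str) -> str:
--     """
--     Remove other descriptions in the case where the text contains descriptions for multiple resource
--     types, and return only the description for the specified resource type.
--     """
--     if description.startswith("Multiple Resources:"):
--         for description_for_resource_type in description.split("\n"):
--             if description_for_resource_type.startswith(f"* [{resource_type}]"):
--                 _, description = description_for_resource_type.split(": ", maxsplit=1)
--                 if description.endswith("\r"):
--                     return description[:-1]
--         else:
--             raise AssertionError("Resource type must exist in the description")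
--
--     return description
-- ===== SOURCE B (Python) =====
-- def _transform_description(description: str, resource_type: str) -> str:
--     """
--     Return only the description line for the given resource type when the text
--     carries descriptions for multiple resource types.
--     """
--     if not description.startswith("Multiple Resources:"):
--         return description
--     prefix = f"* [{resource_type}]"
--     line = next((l for l in description.split("\n") if l.startswith(prefix)), None)
--     assert line is not None, "Resource type must exist in the description"
--     _, rest = line.split(": ", maxsplit=1)
--     return rest.removesuffix("\r")
-- ===== Notes on version B (the rewrite author's own statement) =====
-- stated objective: idiomatic
-- what changed: Replaces A's loop-with-conditional-return and for-else (which only returns at a CR-terminated match and otherwise keeps scanning) by guard-inversion plus a single next()-search for the first matching line, then one unconditional extract with removesuffix('\r').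
-- outside the precondition, e.g. on _transform_description('Multiple Resources:\n* [X]: a\n* [X]: b\r\n', 'X'): A returns 'b', B returns 'a'
import Mathlib
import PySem

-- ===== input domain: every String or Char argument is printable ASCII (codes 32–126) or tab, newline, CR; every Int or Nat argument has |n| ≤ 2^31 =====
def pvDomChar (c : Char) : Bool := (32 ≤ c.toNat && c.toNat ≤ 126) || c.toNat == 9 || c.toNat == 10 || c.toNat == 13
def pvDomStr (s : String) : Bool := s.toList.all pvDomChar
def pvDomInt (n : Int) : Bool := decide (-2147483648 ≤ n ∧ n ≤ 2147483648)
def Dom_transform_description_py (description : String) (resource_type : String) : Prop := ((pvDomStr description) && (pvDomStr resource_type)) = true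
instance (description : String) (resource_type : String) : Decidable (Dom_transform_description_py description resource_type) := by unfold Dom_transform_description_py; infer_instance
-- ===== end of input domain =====

-- B replaces A's loop-with-conditional-return and for-else by a single find-first-matching-line
-- followed by one unconditional extract (idiomatic; same cost); on A's raising inputs (excluded
-- by Pre_) B may behave differently.

-- ===== PORT A =====
-- f"* [{resource_type}]" (both Pythons build this literal prefix)
def pvPrefix (resource_type : String) : List Char :=
  "* [".toList ++ resource_type.toList ++ "]".toList

-- `_, rest = line.split(": ", maxsplit=1)` / `line.split(": ", 1)[1]`: the text after the first
-- ": "; none = ValueError/IndexError (this very line occurs in both A and B)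
def pvRest? (line : List Char) : Option (List Char) :=
  match PySem.Chars.splitMax? line ": ".toList 1 with
  | some [_, r] => some r
  | _ => none

-- A's for-loop over description.split("\n"): on a matching line split off `rest`; return
-- rest[:-1] only if rest endswith "\r", else keep scanning; [] stands for the raising exits
-- (for-else AssertionError / unpack ValueError), both excluded by Pre_.
def pvALoop (pre : List Char) : List (List Char) → List Char
  | [] => []                                   -- for-else: raise AssertionError
  | l :: ls =>
    if PySem.Chars.startswith l pre then
      match pvRest? l with
      | none => []                             -- ValueError
      | some r =>
        if PySem.Chars.endswith r ['\r'] then r.dropLast else pvALoop pre ls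
    else pvALoop pre ls

def transform_description_py (description : String) (resource_type : String) : String :=
  if PySem.Str.startswith description "Multiple Resources:" then
    String.ofList (pvALoop (pvPrefix resource_type)
      (PySem.Chars.splitOn description.toList "\n".toList))
  else description

-- ===== PORT B =====
-- rest.removesuffix("\r") — ported by hand, exact for a one-character suffix
def pvRemoveCR (r : List Char) : List Char :=
  if PySem.Chars.endswith r ['\r'] then r.dropLast else r

def transform_description_py_alt (description : String) (resource_type : String) : String :=
  if !(PySem.Str.startswith description "Multiple Resources:") then description
  else
    match (PySem.Chars.splitOn description.toList "\n".toList).find?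
        (fun l => PySem.Chars.startswith l (pvPrefix resource_type)) with
    | none => ""                               -- assert fails: AssertionError
    | some line =>
      match pvRest? line with
      | none => ""                             -- IndexError
      | some rest => String.ofList (pvRemoveCR rest)

-- ===== PRECONDITION & SPEC =====
-- The lines of description.split("\n") that start with "* [resource_type]"
def pvMatches (description : String) (resource_type : String) : List (List Char) :=
  (PySem.Chars.splitOn description.toList "\n".toList).filter
    (fun l => PySem.Chars.startswith l (pvPrefix resource_type))

-- Besides A's raising inputs (no matching line / matching line without ": " / no CR-terminated
-- match: AssertionError or ValueError), Pre_ excludes descriptions with MORE than one line for the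
-- resource type, where A's pick (first CR-terminated match) vs B's (first match) is an accidental
-- first-vs-later-match choice on a duplicate-entry corner.
def Pre_transform_description_py (description : String) (resource_type : String) : Prop :=
  PySem.Str.startswith description "Multiple Resources:" = true →
    ((pvMatches description resource_type).length = 1 ∧
     (pvRest? ((pvMatches description resource_type).headD [])).isSome = true ∧
     PySem.Chars.endswith
       ((pvRest? ((pvMatches description resource_type).headD [])).getD []) ['\r'] = true)
instance (description : String) (resource_type : String) :
    Decidable (Pre_transform_description_py description resource_type) := by
  unfold Pre_transform_description_py; infer_instance

def pvWitness_transform_description_py : String × String :=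
  ("Multiple Resources:\r\n* [X]: desc for x\r\n* [Y]: desc for y\r\n", "X")

def Spec_transform_description_py (description : String) (resource_type : String) (out : String) : Prop := out = transform_description_py_alt description resource_type
instance (description : String) (resource_type : String) (out : String) : Decidable (Spec_transform_description_py description resource_type out) := by unfold Spec_transform_description_py; infer_instance

-- ===== CLAIM (what is proved, stated in full; the proofs are below) =====
def Claim_equal_transform_description_py : Prop := ∀ (description : String) (resource_type : String), Dom_transform_description_py description resource_type → Pre_transform_description_py description resource_type → Spec_transform_description_py description resource_type (transform_description_py description resource_type)


-- ===== LEMMAS AND PROOFS =====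

-- A's scan, when exactly one line matches and its rest is CR-terminated, returns that rest
-- without the CR.
lemma pvALoop_unique (pre : List Char) (ls : List (List Char)) (m : List Char) (r : List Char)
    (hf : ls.filter (fun l => PySem.Chars.startswith l pre) = [m])
    (hr : pvRest? m = some r)
    (hcr : PySem.Chars.endswith r ['\r'] = true) :
    pvALoop pre ls = r.dropLast := by
  induction ls with
  | nil => simp at hf
  | cons l ls ih =>
    by_cases h : PySem.Chars.startswith l pre = true
    · rw [List.filter_cons] at hf
      simp only [h, if_true] at hf
      obtain ⟨rfl, hnil⟩ := by simpa using hf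
      simp [pvALoop, h, hr, hcr]
    · rw [List.filter_cons] at hf
      simp only [h, if_false, Bool.false_eq_true] at hf
      simpa [pvALoop, h] using ih hf

theorem transform_description_py_spec : Claim_equal_transform_description_py := by
  intro description resource_type _ hpre
  unfold Spec_transform_description_py transform_description_py transform_description_py_alt
  by_cases hsw : PySem.Str.startswith description "Multiple Resources:" = true
  · obtain ⟨hlen, hsome, hcr⟩ := hpre hsw
    set lines := PySem.Chars.splitOn description.toList "\n".toList with hlines
    set p := fun l => PySem.Chars.startswith l (pvPrefix resource_type) with hp
    have hms : pvMatches description resource_type = lines.filter p := rfl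
    obtain ⟨m, hm⟩ : ∃ m, lines.filter p = [m] := by
      rw [hms] at hlen
      match hEq : lines.filter p with
      | [m] => exact ⟨m, rfl⟩
      | [] => rw [hEq] at hlen; simp at hlen
      | _ :: _ :: _ => rw [hEq] at hlen; simp at hlen
    have hhead : (pvMatches description resource_type).headD [] = m := by
      rw [hms, hm]; rfl
    rw [hhead] at hsome hcr
    obtain ⟨r, hr⟩ := Option.isSome_iff_exists.mp hsome
    rw [hr] at hcr; simp at hcr
    have hfind : lines.find? p = some m := by
      rw [← List.head?_filter, hm]; rfl
    rw [hsw]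
    simp only [Bool.not_true, Bool.false_eq_true, if_false, hfind, hr]
    rw [pvALoop_unique (pvPrefix resource_type) lines m r hm hr hcr]
    simp [pvRemoveCR, hcr]
  · have hsw' : PySem.Chars.startswith description.toList "Multiple Resources:".toList = false := by
      simpa using hsw
    have hsw2 : PySem.Chars.startswith description.toList
        ['M','u','l','t','i','p','l','e',' ','R','e','s','o','u','r','c','e','s',':'] = false := hsw'
    simp [hsw2]
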